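-- pv_equiv track=rewrite | github.com/u9401066/med-paper-assistant | tests/test_voice_consistency.py | _uniform_paragraphs
-- ===== SOURCE A (Python) =====
-- def _uniform_paragraphs(n: int = 6) -> str:
--     """Generate n paragraphs with very similar style (should pass A3c)."""
--     base_sentences = [
--         "The patient received standard treatment during the study period.",
--         "Blood samples were collected at baseline and at follow-up visits.",
--         "Statistical analysis was performed using standard software packages.",
--         "The primary outcome was measured at four weeks after enrollment.",
--         "Adverse events were recorded throughout the observation period.",
--         "Written informed consent was obtained from all participants.",
--     ]
--     paragraphs = []
--     for i in range(n):
--         # Rotate sentences to create varied but stylistically consistent paragraphs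
--         rotated = (
--             base_sentences[i % len(base_sentences) :] + base_sentences[: i % len(base_sentences)]
--         )
--         paragraphs.append(" ".join(rotated))
--     return "\n\n".join(paragraphs)
-- ===== SOURCE B (Python) =====
-- def _uniform_paragraphs(n: int = 6) -> str:
--     """Generate n paragraphs with very similar style (should pass A3c)."""
--     base_sentences = [
--         "The patient received standard treatment during the study period.",
--         "Blood samples were collected at baseline and at follow-up visits.",
--         "Statistical analysis was performed using standard software packages.",
--         "The primary outcome was measured at four weeks after enrollment.",
--         "Adverse events were recorded throughout the observation period.",
--         "Written informed consent was obtained from all participants.",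
--     ]
--     k = len(base_sentences)
--     # Rotations are periodic with period k: build all k paragraph strings once.
--     table = [" ".join(base_sentences[r:] + base_sentences[:r]) for r in range(k)]
--     # Second pass only indexes the precomputed table.
--     return "\n\n".join(table[i % k] for i in range(n))
-- ===== Notes on version B (the rewrite author's own statement) =====
-- stated objective: alternative
-- what changed: B precomputes the six rotated-and-joined paragraph strings once (the rotation is periodic with period 6) and then produces the output with a second pass that only indexes this table by i % 6, instead of re-slicing and re-joining the sentence list on every iteration.
import Mathlib
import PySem

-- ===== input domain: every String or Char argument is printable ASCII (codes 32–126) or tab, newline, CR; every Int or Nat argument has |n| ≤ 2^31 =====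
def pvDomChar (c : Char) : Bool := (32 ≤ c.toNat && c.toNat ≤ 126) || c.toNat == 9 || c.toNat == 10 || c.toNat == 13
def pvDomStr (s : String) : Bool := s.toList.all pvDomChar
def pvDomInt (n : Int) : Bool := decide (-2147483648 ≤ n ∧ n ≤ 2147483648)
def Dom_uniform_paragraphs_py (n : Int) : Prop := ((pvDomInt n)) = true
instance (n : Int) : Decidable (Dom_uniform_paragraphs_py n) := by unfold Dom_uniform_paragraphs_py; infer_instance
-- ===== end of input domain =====

-- B builds the six rotated paragraphs once and then only indexes that table by i % 6;
-- A re-slices and re-joins the sentence list for every paragraph. (objective: alternative)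

-- ===== PORT A =====
def pvBase : List String := [
    "The patient received standard treatment during the study period.",
    "Blood samples were collected at baseline and at follow-up visits.",
    "Statistical analysis was performed using standard software packages.",
    "The primary outcome was measured at four weeks after enrollment.",
    "Adverse events were recorded throughout the observation period.",
    "Written informed consent was obtained from all participants."]

def uniform_paragraphs_py (n : Int) : String :=
  -- for i in range(n): rotated = base[i%len:] + base[:i%len]; paragraphs.append(" ".join(rotated))
  let paragraphs := (PySem.List.pyRange 0 n 1).foldl
    (fun acc i =>
      let r := PySem.Int.mod i (pvBase.length : Int)
      acc ++ [PySem.Str.join " " (PySem.List.slice pvBase (some r) none ++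
                                  PySem.List.slice pvBase none (some r))]) []
  PySem.Str.join "\n\n" paragraphs

-- ===== PORT B =====
def uniform_paragraphs_py_alt (n : Int) : String :=
  -- table = [" ".join(base[r:] + base[:r]) for r in range(k)]; join table[i % k] over range(n)
  let k : Int := (pvBase.length : Int)
  let table := (PySem.List.pyRange 0 k 1).map
    (fun r => PySem.Str.join " " (PySem.List.slice pvBase (some r) none ++
                                  PySem.List.slice pvBase none (some r)))
  -- table[i % k]: the index 0 ≤ i % k < k is always in range, so pyGetD's default is never used
  PySem.Str.join "\n\n" ((PySem.List.pyRange 0 n 1).map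
    (fun i => PySem.List.pyGetD table (PySem.Int.mod i k) ""))

-- ===== PRECONDITION & SPEC =====
def Spec_uniform_paragraphs_py (n : Int) (out : String) : Prop := out = uniform_paragraphs_py_alt n
instance (n : Int) (out : String) : Decidable (Spec_uniform_paragraphs_py n out) := by unfold Spec_uniform_paragraphs_py; infer_instance

-- ===== CLAIM (what is proved, stated in full; the proofs are below) =====
def Claim_equal_uniform_paragraphs_py : Prop := ∀ (n : Int), Dom_uniform_paragraphs_py n → Spec_uniform_paragraphs_py n (uniform_paragraphs_py n)

-- ===== LEMMAS AND PROOFS =====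

-- For every i, the paragraph A slices-and-joins equals the table entry B looks up at i % 6.
theorem pv_para_eq (i : Int) :
    PySem.Str.join " " (PySem.List.slice pvBase (some (PySem.Int.mod i (pvBase.length : Int))) none ++
                        PySem.List.slice pvBase none (some (PySem.Int.mod i (pvBase.length : Int)))) =
    PySem.List.pyGetD
      ((PySem.List.pyRange 0 (pvBase.length : Int) 1).map
        (fun r => PySem.Str.join " " (PySem.List.slice pvBase (some r) none ++
                                      PySem.List.slice pvBase none (some r))))
      (PySem.Int.mod i (pvBase.length : Int)) "" := by
  have h0 : (0:Int) < (pvBase.length : Int) := by decide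
  have hge := PySem.Int.mod_nonneg i h0
  have hlt := PySem.Int.mod_lt i h0
  rw [PySem.List.pyGetD_map_pyRange_of_nonneg _ _ _ _ hge hlt]

-- ===== VERDICT (by name: the statement is the Claim_ definition above) =====
theorem uniform_paragraphs_py_spec : Claim_equal_uniform_paragraphs_py := by
  intro n _
  show uniform_paragraphs_py n = uniform_paragraphs_py_alt n
  unfold uniform_paragraphs_py uniform_paragraphs_py_alt
  rw [PySem.List.foldl_append_singleton_eq_map]
  simp only [List.nil_append]
  congr 1
  exact List.map_congr_left (fun i _ => pv_para_eq i)
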